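-- pv_equiv track=rewrite | github.com/DebmalyaPal/UCSD-FA25-CSE258 | HOMEWORK-3/.ipynb_checkpoints/homework3-checkpoint.py | baseLineStrategy
-- ===== SOURCE A (Python) =====
-- def baseLineStrategy(mostPopular, totalRead):
--     return1 = set()
--
--     # Compute the set of items for which we should return "True"
--     # This is the same strategy implemented in the baseline code for Assignment 1
--     return1 = set()
--     count = 0
--     for ic, i in mostPopular:
--         count += ic
--         return1.add(i)
--         if count > totalRead/2: break
--
--     return return1
-- ===== SOURCE B (Python) =====
-- def baseLineStrategy(mostPopular, totalRead):
--     # pass 1: prefix sums of the counts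
--     prefix = []
--     s = 0
--     for ic, _ in mostPopular:
--         s += ic
--         prefix.append(s)
--     # pass 2: first index whose cumulative count exceeds half the total
--     # (inclusive cutoff; if never exceeded, keep everything)
--     j = next((k for k, p in enumerate(prefix) if p > totalRead / 2),
--              len(mostPopular) - 1)
--     return {i for _, i in mostPopular[:j + 1]}
-- ===== Notes on version B (the rewrite author's own statement) =====
-- stated objective: alternative
-- what changed: Replaces A's fused accumulate-add-break loop over a growing set with two separate passes: build the prefix-sum table of the counts, locate the first index whose prefix sum exceeds totalRead/2 (or the last index if none does), then build the set from the slice up to that index.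
import Mathlib
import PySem

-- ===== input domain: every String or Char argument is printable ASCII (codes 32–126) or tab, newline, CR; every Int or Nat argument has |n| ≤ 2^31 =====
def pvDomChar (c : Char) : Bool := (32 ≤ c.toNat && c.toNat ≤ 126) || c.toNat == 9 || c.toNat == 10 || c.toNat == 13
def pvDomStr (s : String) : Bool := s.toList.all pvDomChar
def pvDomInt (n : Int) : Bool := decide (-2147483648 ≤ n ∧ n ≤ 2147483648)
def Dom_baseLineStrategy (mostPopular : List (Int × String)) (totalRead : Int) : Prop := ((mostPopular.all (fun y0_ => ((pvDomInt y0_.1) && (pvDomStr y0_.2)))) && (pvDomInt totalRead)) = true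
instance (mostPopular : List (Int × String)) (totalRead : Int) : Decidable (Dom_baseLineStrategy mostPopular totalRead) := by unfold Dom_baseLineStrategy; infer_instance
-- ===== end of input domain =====

-- B replaces A's fused accumulate-add-break loop by two passes: a prefix-sum table,
-- then a cutoff index found in the table and a slice turned into a set (objective: alternative).

-- ===== PORT A =====
-- A's loop with early break: state = (count, return1); 'count > totalRead/2' is
-- ported as the exact integer equivalent '2*count > totalRead'.
def baseLineStrategy_go (totalRead : Int) : List (Int × String) → Int → PySem.Set String → PySem.Set String
  | [], _, return1 => return1
  | (ic, i) :: rest, count, return1 =>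
    let count' := count + ic
    let return1' := PySem.Set.add return1 i
    if 2 * count' > totalRead then return1'
    else baseLineStrategy_go totalRead rest count' return1'

def baseLineStrategy (mostPopular : List (Int × String)) (totalRead : Int) : List String :=
  baseLineStrategy_go totalRead mostPopular 0 PySem.Set.empty

-- ===== PORT B =====
-- pass 1 of Source B: the prefix-sum table of the counts
def baseLineStrategy_prefixSums : List (Int × String) → Int → List Int
  | [], _ => []
  | (ic, _) :: rest, s => (s + ic) :: baseLineStrategy_prefixSums rest (s + ic)

-- pass 2 of Source B: first index whose prefix sum exceeds totalRead/2 (exact integer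
-- form '2*p > totalRead'), default len-1; then set(items of mostPopular[:j+1])
def baseLineStrategy_alt (mostPopular : List (Int × String)) (totalRead : Int) : List String :=
  let prefixTab := baseLineStrategy_prefixSums mostPopular 0
  let j : Int := match prefixTab.findIdx? (fun p => 2 * p > totalRead) with
    | some k => (k : Int)
    | none => (mostPopular.length : Int) - 1
  PySem.Set.ofList ((PySem.List.slice mostPopular none (some (j + 1))).map Prod.snd)

-- ===== PRECONDITION & SPEC =====
def Spec_baseLineStrategy (mostPopular : List (Int × String)) (totalRead : Int) (out : List String) : Prop := out = baseLineStrategy_alt mostPopular totalRead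
instance (mostPopular : List (Int × String)) (totalRead : Int) (out : List String) : Decidable (Spec_baseLineStrategy mostPopular totalRead out) := by unfold Spec_baseLineStrategy; infer_instance

-- ===== CLAIM (what is proved, stated in full; the proofs are below) =====
def Claim_equal_baseLineStrategy : Prop := ∀ (mostPopular : List (Int × String)) (totalRead : Int), Dom_baseLineStrategy mostPopular totalRead → Spec_baseLineStrategy mostPopular totalRead (baseLineStrategy mostPopular totalRead)

-- ===== LEMMAS AND PROOFS =====

-- number of items A's loop consumes, phrased through B's prefix-sum table
def pvCut (totalRead : Int) (mp : List (Int × String)) (s : Int) : Nat :=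
  match (baseLineStrategy_prefixSums mp s).findIdx? (fun p => 2 * p > totalRead) with
  | some k => k + 1
  | none => mp.length

lemma pv_go_eq_update (totalRead : Int) (mp : List (Int × String)) :
    ∀ (s : Int) (acc : PySem.Set String),
      baseLineStrategy_go totalRead mp s acc
        = PySem.Set.update acc ((mp.take (pvCut totalRead mp s)).map Prod.snd) := by
  induction mp with
  | nil =>
    intro s acc
    simp [baseLineStrategy_go, pvCut, baseLineStrategy_prefixSums, PySem.Set.update]
  | cons hd rest ih =>
    intro s acc
    obtain ⟨ic, i⟩ := hd
    simp only [baseLineStrategy_go, pvCut, baseLineStrategy_prefixSums, List.findIdx?_cons]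
    by_cases h : 2 * (s + ic) > totalRead
    · simp [h, PySem.Set.update_cons, PySem.Set.update_nil]
    · simp only [h, decide_false, if_false, Bool.false_eq_true]
      rw [ih (s + ic) (PySem.Set.add acc i)]
      simp only [pvCut]
      cases hfi : (baseLineStrategy_prefixSums rest (s + ic)).findIdx? (fun p => 2 * p > totalRead) with
      | none =>
        simp [List.take_succ_cons, PySem.Set.update_cons]
      | some k =>
        simp [List.take_succ_cons, PySem.Set.update_cons]

-- ===== VERDICT (by name: the statement is the Claim_ definition above) =====
theorem baseLineStrategy_spec : Claim_equal_baseLineStrategy := by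
  intro mp t _
  show baseLineStrategy mp t = baseLineStrategy_alt mp t
  rw [baseLineStrategy, pv_go_eq_update, baseLineStrategy_alt]
  simp only [PySem.Set.update_empty]
  congr 1
  simp only [pvCut]
  cases hfi : (baseLineStrategy_prefixSums mp 0).findIdx? (fun p => 2 * p > t) with
  | none =>
    show (mp.take mp.length).map Prod.snd
        = (PySem.List.slice mp none (some ((mp.length : Int) - 1 + 1))).map Prod.snd
    have h1 : ((mp.length : Int) - 1 + 1) = ((mp.length : Nat) : Int) := by ring
    rw [h1, PySem.List.slice_to_natCast, List.take_length]
  | some k =>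
    show (mp.take (k + 1)).map Prod.snd
        = (PySem.List.slice mp none (some ((k : Int) + 1))).map Prod.snd
    have h1 : ((k : Int) + 1) = (((k + 1 : Nat)) : Int) := by push_cast; ring
    rw [h1, PySem.List.slice_to_natCast]
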